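-- pv_equiv track=rewrite | github.com/j-last/advent-of-code-2024 | day 7/day 7 part 1.py | can_be_true
-- ===== SOURCE A (Python) =====
-- def den_to_bin(den, length):
--     binary = str(bin(den))[2:]
--     binary = "0" * (length - len(binary)) + binary
--     return binary
--
-- def can_be_true(value, original_operands):
--     for i in range(2 ** (len(original_operands)-1)):
--         binary = den_to_bin(i, len(original_operands) - 1)
--
--         operands = original_operands.copy()
--         total = operands.pop(0)
--         for digit in binary:
--             match digit:
--                 case "0": total += operands.pop(0)
--                 case "1": total *= operands.pop(0)
--
--         if total == value:
--             return True
--     return False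
-- ===== SOURCE B (Python) =====
-- def can_be_true(value, original_operands):
--     # Reachable-totals set DP with dedup instead of enumerating all 2^(n-1) operator strings.
--     totals = {original_operands[0]}
--     for x in original_operands[1:]:
--         totals = {t + x for t in totals} | {t * x for t in totals}
--     return value in totals
-- ===== Notes on version B (the rewrite author's own statement) =====
-- stated objective: alternative
-- what changed: Replaces the enumeration of all 2^(n-1) binary operator strings (with string construction and list popping per candidate) by a single left-to-right pass maintaining the deduplicated set of reachable running totals.
import Mathlib
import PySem

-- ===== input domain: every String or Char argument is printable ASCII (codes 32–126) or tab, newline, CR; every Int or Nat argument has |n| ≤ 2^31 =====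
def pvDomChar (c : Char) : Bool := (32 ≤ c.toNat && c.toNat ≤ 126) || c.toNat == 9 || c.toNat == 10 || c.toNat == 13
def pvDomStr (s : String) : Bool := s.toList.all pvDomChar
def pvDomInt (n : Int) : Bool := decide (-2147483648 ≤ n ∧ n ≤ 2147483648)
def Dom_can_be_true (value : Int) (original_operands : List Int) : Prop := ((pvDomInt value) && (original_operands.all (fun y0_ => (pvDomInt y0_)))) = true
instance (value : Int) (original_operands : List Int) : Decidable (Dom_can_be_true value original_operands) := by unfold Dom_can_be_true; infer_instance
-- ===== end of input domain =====

-- B replaces A's enumeration of all 2^(n-1) operator strings by one pass over the operands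
-- maintaining the deduplicated set of reachable running totals (objective: alternative).

-- ===== PORT A =====

-- bin digits of a Nat, least significant first; [] for 0
def pvBinAux : Nat → List Char
  | 0 => []
  | n+1 => (if (n+1) % 2 = 1 then '1' else '0') :: pvBinAux ((n+1)/2)
decreasing_by exact Nat.div_lt_self (Nat.succ_pos n) (by omega)

-- str(bin(n))[2:] for n ≥ 0
def pvBin (n : Nat) : List Char := if n = 0 then ['0'] else (pvBinAux n).reverse

def den_to_bin (den : Int) (length : Int) : String :=
  -- str(bin(den))[2:]; exact for den ≥ 0 (A only calls it with den drawn from range(...), hence ≥ 0)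
  let binary : List Char := pvBin den.toNat
  -- binary = "0" * (length - len(binary)) + binary  (negative repeat count gives "")
  String.ofList (List.replicate (length - (binary.length : Int)).toNat '0' ++ binary)

-- one step of A's inner loop: match digit: "0" → total += operands.pop(0); "1" → total *= operands.pop(0)
def pvStep (state : Int × List Int) (digit : Char) : Int × List Int :=
  match digit, state with
  | '0', (total, o :: rest) => (total + o, rest)
  | '1', (total, o :: rest) => (total * o, rest)
  | _, s => s   -- pop from empty would raise IndexError in Python (unreachable under Pre_); other digits never occur

-- A's outer for-loop with its early return
def pvLoopA (value : Int) (original_operands : List Int) : List Int → Bool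
  | [] => false
  | i :: is =>
    let binary := den_to_bin i ((original_operands.length : Int) - 1)
    match original_operands with
    | [] => false   -- total = operands.pop(0) raises IndexError in Python (outside Pre_)
    | o :: rest =>
      if (binary.toList.foldl pvStep (o, rest)).1 = value then true
      else pvLoopA value original_operands is

def can_be_true (value : Int) (original_operands : List Int) : Bool :=
  pvLoopA value original_operands
    (PySem.List.pyRange 0 ((2 : Int) ^ (original_operands.length - 1)) 1)

-- ===== PORT B =====

-- totals = {t + x for t in totals} | {t * x for t in totals}
def pvAltStep (totals : PySem.Set Int) (x : Int) : PySem.Set Int :=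
  PySem.Set.union (PySem.Set.ofList (totals.map (· + x))) (totals.map (· * x))

def can_be_true_alt (value : Int) (original_operands : List Int) : Bool :=
  match original_operands with
  | [] => false   -- Source B raises IndexError here (outside Pre_)
  | o :: _ =>
    let totals := (PySem.List.slice original_operands (some 1) none).foldl pvAltStep
                    (PySem.Set.ofList [o])
    PySem.Set.contains totals value

-- ===== PRECONDITION & SPEC =====
-- Pre_ excludes operand lists of length < 2, on which A raises (TypeError on [], IndexError on a singleton).
def Pre_can_be_true (value : Int) (original_operands : List Int) : Prop :=
  2 ≤ original_operands.length
instance (value : Int) (original_operands : List Int) : Decidable (Pre_can_be_true value original_operands) := by unfold Pre_can_be_true; infer_instance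

def pvWitness_can_be_true : Int × List Int := (292, [11, 6, 16, 20])

def Spec_can_be_true (value : Int) (original_operands : List Int) (out : Bool) : Prop := out = can_be_true_alt value original_operands
instance (value : Int) (original_operands : List Int) (out : Bool) : Decidable (Spec_can_be_true value original_operands out) := by unfold Spec_can_be_true; infer_instance

-- ===== CLAIM (what is proved, stated in full; the proofs are below) =====
def Claim_equal_can_be_true : Prop := ∀ (value : Int) (original_operands : List Int), Dom_can_be_true value original_operands → Pre_can_be_true value original_operands → Spec_can_be_true value original_operands (can_be_true value original_operands)

-- ===== LEMMAS AND PROOFS =====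

theorem pvBinAux_zero : pvBinAux 0 = [] := by rw [pvBinAux]

theorem pvBinAux_eq (n : Nat) (h : n ≠ 0) :
    pvBinAux n = (if n % 2 = 1 then '1' else '0') :: pvBinAux (n / 2) := by
  cases n with
  | zero => exact absurd rfl h
  | succ m => rw [pvBinAux]

-- the binary digits of i, LSB first, zero-padded on the high end to length L (when len ≤ L)
def dLSB (i L : Nat) : List Char := pvBinAux i ++ List.replicate (L - (pvBinAux i).length) '0'

-- all bit strings of length L, MSB first, in the order A's range loop produces them
def allBits : Nat → List (List Char)
  | 0 => [[]]
  | L+1 => (allBits L).map (fun ds => '0' :: ds) ++ (allBits L).map (fun ds => '1' :: ds)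

-- all totals reachable from t over ops, in A's enumeration order
def allTotals : Int → List Int → List Int
  | t, [] => [t]
  | t, x :: r => allTotals (t + x) r ++ allTotals (t * x) r

def evalD (t : Int) (ops : List Int) (ds : List Char) : Int := (ds.foldl pvStep (t, ops)).1

theorem len_pvBinAux (L : Nat) : ∀ i, i < 2 ^ L → (pvBinAux i).length ≤ L := by
  induction L with
  | zero =>
    intro i hi
    interval_cases i
    simp [pvBinAux]
  | succ L ih =>
    intro i hi
    cases i with
    | zero => simp [pvBinAux]
    | succ m =>
      rw [pvBinAux_eq (m+1) (by omega)]
      have h2 : (m+1)/2 < 2 ^ L := by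
        have := Nat.pow_succ 2 L
        omega
      have := ih ((m+1)/2) h2
      simp
      omega

theorem pvBinAux_upper (L : Nat) : ∀ j, j < 2 ^ L → pvBinAux (2 ^ L + j) = dLSB j L ++ ['1'] := by
  induction L with
  | zero =>
    intro j hj
    interval_cases j
    simp [dLSB, pvBinAux_zero, pvBinAux_eq 1 (by omega)]
  | succ L ih =>
    intro j hj
    have hpow : 2 ^ (L+1) = 2 ^ L + 2 ^ L := by rw [Nat.pow_succ]; omega
    rw [pvBinAux_eq (2 ^ (L+1) + j) (by positivity)]
    have hmod : (2 ^ (L+1) + j) % 2 = j % 2 := by omega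
    have hdiv : (2 ^ (L+1) + j) / 2 = 2 ^ L + j / 2 := by omega
    rw [hmod, hdiv, ih (j/2) (by omega)]
    cases j with
    | zero =>
      simp [dLSB, pvBinAux, List.replicate_succ]
    | succ m =>
      rw [dLSB, dLSB, pvBinAux_eq (m+1) (by omega)]
      have hlen : (pvBinAux ((m+1)/2)).length ≤ L := len_pvBinAux L _ (by omega)
      simp only [List.length_cons, List.cons_append]
      have : L + 1 - ((pvBinAux ((m+1)/2)).length + 1) = L - (pvBinAux ((m+1)/2)).length := by omega
      rw [this]

theorem dLSB_lower (L i : Nat) (h : i < 2 ^ L) : dLSB i (L + 1) = dLSB i L ++ ['0'] := by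
  have hlen : (pvBinAux i).length ≤ L := len_pvBinAux L i h
  rw [dLSB, dLSB]
  have : L + 1 - (pvBinAux i).length = (L - (pvBinAux i).length) + 1 := by omega
  rw [this]
  simp [List.replicate_succ', List.append_assoc]

theorem dLSB_upper (L j : Nat) (h : j < 2 ^ L) : dLSB (2 ^ L + j) (L + 1) = dLSB j L ++ ['1'] := by
  have hup := pvBinAux_upper L j h
  have hlen : (pvBinAux j).length ≤ L := len_pvBinAux L j h
  rw [dLSB, hup]
  have : (dLSB j L ++ ['1']).length = L + 1 := by
    simp [dLSB]
    omega
  rw [this]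
  simp

theorem den_to_bin_toList (L i : Nat) (hL : 1 ≤ L) (h : i < 2 ^ L) :
    (den_to_bin (i : Int) (L : Int)).toList = (dLSB i L).reverse := by
  cases i with
  | zero =>
    simp [den_to_bin, pvBin, dLSB, pvBinAux_zero]
    have h2 : List.replicate (L-1) '0' ++ ['0'] = List.replicate L '0' := by
      rw [← List.replicate_succ']
      congr 1
      omega
    rw [h2]
  | succ m =>
    have hne : m + 1 ≠ 0 := by omega
    have hlen : (pvBinAux (m+1)).length ≤ L := len_pvBinAux L (m+1) h
    simp [den_to_bin, pvBin, dLSB]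

theorem range_map_dLSB (L : Nat) :
    (List.range (2 ^ L)).map (fun i => (dLSB i L).reverse) = allBits L := by
  induction L with
  | zero => simp [allBits, dLSB, pvBinAux]
  | succ L ih =>
    have hpow : 2 ^ (L+1) = 2 ^ L + 2 ^ L := by rw [Nat.pow_succ]; omega
    rw [hpow, List.range_add, List.map_append, List.map_map, allBits]
    congr 1
    · rw [← ih, List.map_map]
      apply List.map_congr_left
      intro i hi
      have : i < 2 ^ L := List.mem_range.mp hi
      simp [dLSB_lower L i this]
    · rw [← ih, List.map_map]
      apply List.map_congr_left
      intro j hj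
      have : j < 2 ^ L := List.mem_range.mp hj
      simp [dLSB_upper L j this]

theorem allTotals_eq_map (ops : List Int) : ∀ t, allTotals t ops = (allBits ops.length).map (evalD t ops) := by
  induction ops with
  | nil => intro t; simp [allTotals, allBits, evalD]
  | cons x r ih =>
    intro t
    simp only [allTotals, List.length_cons, allBits, List.map_append, List.map_map]
    rw [ih (t + x), ih (t * x)]
    congr 1

theorem pvLoopA_any (value o : Int) (rest : List Int) : ∀ is : List Int,
    pvLoopA value (o :: rest) is
      = is.any (fun i => decide (evalD o rest (den_to_bin i ((rest.length : Int))).toList = value)) := by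
  have hc : ((o :: rest).length : Int) - 1 = (rest.length : Int) := by simp
  intro is
  induction is with
  | nil => rfl
  | cons i is ih =>
    simp only [pvLoopA, hc, List.any_cons, evalD]
    split_ifs with h
    · simp [h]
    · rw [ih]
      simp [evalD, h]

theorem foldl_pvAltStep_mem (v : Int) : ∀ (rest : List Int) (S : PySem.Set Int),
    (v ∈ rest.foldl pvAltStep S) ↔ ∃ t ∈ S, v ∈ allTotals t rest := by
  intro rest
  induction rest with
  | nil => intro S; simp [allTotals]
  | cons x r ih =>
    intro S
    rw [List.foldl_cons, ih]
    simp only [pvAltStep, PySem.Set.mem_union, PySem.Set.mem_ofList, List.mem_map,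
      allTotals, List.mem_append]
    constructor
    · rintro ⟨t, ht, hv⟩
      rcases ht with ⟨u, hu, rfl⟩ | ⟨u, hu, rfl⟩
      · exact ⟨u, hu, Or.inl hv⟩
      · exact ⟨u, hu, Or.inr hv⟩
    · rintro ⟨u, hu, hv | hv⟩
      · exact ⟨u + x, Or.inl ⟨u, hu, rfl⟩, hv⟩
      · exact ⟨u * x, Or.inr ⟨u, hu, rfl⟩, hv⟩

-- ===== VERDICT (by name: the statement is the Claim_ definition above) =====
theorem can_be_true_spec : Claim_equal_can_be_true := by
  intro value ops _ hP
  unfold Pre_can_be_true at hP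
  unfold Spec_can_be_true
  cases ops with
  | nil => simp at hP
  | cons o rest =>
    have hL : 1 ≤ rest.length := by simp at hP; omega
    rw [Bool.eq_iff_iff]
    have hA : can_be_true value (o :: rest) = true ↔ value ∈ allTotals o rest := by
      rw [can_be_true, PySem.List.pyRange_one, pvLoopA_any, List.any_map]
      have hN : ((2 : Int) ^ ((o :: rest).length - 1) - 0).toNat = 2 ^ rest.length := by
        simp only [List.length_cons, Nat.add_sub_cancel, Int.sub_zero]
        rw [show ((2 : Int) ^ rest.length) = ((2 ^ rest.length : Nat) : Int) from by push_cast; rfl]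
        exact Int.toNat_natCast _
      rw [hN, List.any_eq_true]
      simp only [Function.comp, zero_add, List.mem_range, decide_eq_true_eq]
      constructor
      · rintro ⟨k, hk, hv⟩
        rw [den_to_bin_toList rest.length k hL hk] at hv
        rw [allTotals_eq_map, ← range_map_dLSB]
        exact List.mem_map.mpr ⟨(dLSB k rest.length).reverse,
          List.mem_map.mpr ⟨k, List.mem_range.mpr hk, rfl⟩, hv⟩
      · intro hv
        rw [allTotals_eq_map, ← range_map_dLSB, List.map_map] at hv
        obtain ⟨k, hk, hv⟩ := List.mem_map.mp hv
        have hk' := List.mem_range.mp hk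
        exact ⟨k, hk', by rw [den_to_bin_toList rest.length k hL hk']; exact hv⟩
    have hB : can_be_true_alt value (o :: rest) = true ↔ value ∈ allTotals o rest := by
      rw [can_be_true_alt]
      simp only [PySem.List.slice_from_one, List.tail_cons]
      rw [PySem.Set.contains_iff, foldl_pvAltStep_mem]
      constructor
      · rintro ⟨t, ht, hv⟩
        have : t = o := by
          have := (PySem.Set.mem_ofList _ _).mp ht
          simpa using this
        rwa [this] at hv
      · intro hv
        exact ⟨o, by simp [PySem.Set.mem_ofList], hv⟩
    rw [hA, hB]
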